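-- pv_equiv track=rewrite | github.com/juliusherve/invest-report | show_assets.py | create_list_time
-- ===== SOURCE A (Python) =====
-- def create_list_time(list_of_list):
--     list_of_time = []
--     for liste in list_of_list:
--         for time in liste:
--             if time not in list_of_time:
--                 list_of_time.append(time)
--     sort_indice = sorted(range(len(list_of_time)), key=lambda k: list_of_time[k])
--     list_of_time = [list_of_time[i] for i in sort_indice]
--     return list_of_time
-- ===== SOURCE B (Python) =====
-- def create_list_time(list_of_list):
--     flat = sorted(t for row in list_of_list for t in row)
--     out = []
--     for t in flat:
--         if not out or out[-1] != t:
--             out.append(t)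
--     return out
-- ===== Notes on version B (the rewrite author's own statement) =====
-- stated objective: faster
-- what changed: Replaces A's quadratic membership-scan dedup followed by an index sort with sort-first-then-adjacent-dedup: flatten everything, sort once, and one linear pass keeps each element whose value differs from the last kept one.
import Mathlib
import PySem

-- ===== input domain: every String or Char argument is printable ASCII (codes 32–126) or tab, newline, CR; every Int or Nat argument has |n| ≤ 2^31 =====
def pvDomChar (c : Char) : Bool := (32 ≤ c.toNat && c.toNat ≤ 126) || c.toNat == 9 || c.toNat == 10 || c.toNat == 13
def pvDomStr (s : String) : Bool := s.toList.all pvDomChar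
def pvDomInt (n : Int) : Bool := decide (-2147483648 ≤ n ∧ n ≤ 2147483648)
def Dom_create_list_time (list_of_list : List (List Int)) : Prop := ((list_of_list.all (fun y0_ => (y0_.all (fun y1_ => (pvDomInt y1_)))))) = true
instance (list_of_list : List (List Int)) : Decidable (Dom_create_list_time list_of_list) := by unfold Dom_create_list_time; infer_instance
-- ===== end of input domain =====

-- B replaces A's quadratic dedup-then-index-sort with flatten, one sort, and a linear
-- adjacent-dedup pass (objective: faster, O(n log n) instead of O(n^2)).

-- ===== PORT A =====
def create_list_time (list_of_list : List (List Int)) : List Int :=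
  -- the nested loop: append each time not yet seen
  let list_of_time : List Int :=
    list_of_list.foldl (fun acc liste =>
      liste.foldl (fun acc2 time => if time ∈ acc2 then acc2 else acc2 ++ [time]) acc) []
  -- sorted(range(len(list_of_time)), key=lambda k: list_of_time[k])
  let sort_indice :=
    PySem.List.sorted (PySem.List.pyRange 0 list_of_time.length 1)
      (fun k => PySem.List.pyGetD list_of_time k 0) false
  -- [list_of_time[i] for i in sort_indice]; every i is a valid index, so pyGetD is exact
  sort_indice.map (fun i => PySem.List.pyGetD list_of_time i 0)

-- ===== PORT B =====
def create_list_time_alt (list_of_list : List (List Int)) : List Int :=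
  -- flat = sorted(t for row in list_of_list for t in row)
  let flat := PySem.List.sorted list_of_list.flatten (fun x => x) false
  -- one pass: append t when out is empty or out[-1] != t
  flat.foldl (fun out t =>
    if out = [] ∨ ¬ (PySem.List.pyGetD out (-1) 0 = t) then out ++ [t] else out) []

-- ===== PRECONDITION & SPEC =====
def Spec_create_list_time (list_of_list : List (List Int)) (out : List Int) : Prop := out = create_list_time_alt list_of_list
instance (list_of_list : List (List Int)) (out : List Int) : Decidable (Spec_create_list_time list_of_list out) := by unfold Spec_create_list_time; infer_instance

-- ===== CLAIM (what is proved, stated in full; the proofs are below) =====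
def Claim_equal_create_list_time : Prop := ∀ (list_of_list : List (List Int)), Dom_create_list_time list_of_list → Spec_create_list_time list_of_list (create_list_time list_of_list)

-- ===== LEMMAS AND PROOFS =====

-- A's seen-list loop is exactly PySem.Set.ofList of the flattened input
theorem clt_seen_eq_ofList (ll : List (List Int)) :
    ll.foldl (fun acc liste =>
      liste.foldl (fun acc2 time => if time ∈ acc2 then acc2 else acc2 ++ [time]) acc) []
    = PySem.Set.ofList ll.flatten := by
  rw [PySem.Set.ofList_eq_foldl, List.foldl_flatten]
  congr 1; funext acc liste; congr 1; funext acc2 time; simp [PySem.Set.add]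

-- in a strictly increasing list every element is ≤ the last one
theorem clt_le_getLast {l : List Int} (h : l.Pairwise (· < ·)) (hne : l ≠ []) :
    ∀ a ∈ l, a ≤ l.getLast hne := by
  induction l with
  | nil => simp
  | cons x t ih =>
    intro a ha
    rcases List.mem_cons.mp ha with rfl | hat
    · cases t with
      | nil => simp
      | cons y u =>
        have hx : a < y := (List.pairwise_cons.mp h).1 y (by simp)
        have := ih (List.pairwise_cons.mp h).2 (by simp) y (by simp)
        rw [List.getLast_cons (by simp)]
        omega
    · have ht : t ≠ [] := by intro hnil; rw [hnil] at hat; simp at hat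
      rw [List.getLast_cons ht]
      exact ih (List.pairwise_cons.mp h).2 ht a hat

-- invariant of B's adjacent-dedup pass over a weakly sorted list
theorem clt_dedup_invariant (s : List Int) (acc : List Int)
    (hs : s.Pairwise (· ≤ ·)) (hacc : acc.Pairwise (· < ·))
    (hsep : ∀ a ∈ acc, ∀ x ∈ s, a ≤ x) :
    (s.foldl (fun out t =>
        if out = [] ∨ ¬ (PySem.List.pyGetD out (-1) 0 = t) then out ++ [t] else out) acc).Pairwise (· < ·)
    ∧ ∀ y, y ∈ (s.foldl (fun out t =>
        if out = [] ∨ ¬ (PySem.List.pyGetD out (-1) 0 = t) then out ++ [t] else out) acc)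
        ↔ y ∈ acc ∨ y ∈ s := by
  induction s generalizing acc with
  | nil => simpa using hacc
  | cons t rest ih =>
    have hrest : rest.Pairwise (· ≤ ·) := (List.pairwise_cons.mp hs).2
    have ht_le : ∀ x ∈ rest, t ≤ x := (List.pairwise_cons.mp hs).1
    simp only [List.foldl_cons]
    by_cases hc : acc = [] ∨ ¬ (PySem.List.pyGetD acc (-1) 0 = t)
    · rw [if_pos hc]
      have hlt : ∀ a ∈ acc, a < t := by
        intro a ha
        have hne : acc ≠ [] := by intro h0; rw [h0] at ha; simp at ha
        have hlast := clt_le_getLast hacc hne a ha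
        have hlastmem : acc.getLast hne ∈ acc := List.getLast_mem hne
        have hle := hsep _ hlastmem t (by simp)
        rcases hc with h0 | hneq
        · exact absurd h0 hne
        · rw [PySem.List.pyGetD_neg_one acc 0 hne] at hneq; omega
      have hacc' : (acc ++ [t]).Pairwise (· < ·) := by
        rw [List.pairwise_append]
        exact ⟨hacc, by simp, by simpa using hlt⟩
      have hsep' : ∀ a ∈ acc ++ [t], ∀ x ∈ rest, a ≤ x := by
        intro a ha x hx
        rcases List.mem_append.mp ha with h1 | h1
        · exact hsep a h1 x (by simp [hx])
        · simp at h1; subst h1; exact ht_le x hx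
      obtain ⟨p, m⟩ := ih (acc ++ [t]) hrest hacc' hsep'
      refine ⟨p, fun y => ?_⟩
      rw [m y]; simp; tauto
    · rw [if_neg hc]
      rw [not_or, not_not] at hc
      obtain ⟨hne, hlast⟩ := hc
      have htmem : t ∈ acc := by
        rw [PySem.List.pyGetD_neg_one acc 0 hne] at hlast
        rw [← hlast]; exact List.getLast_mem hne
      have hsep' : ∀ a ∈ acc, ∀ x ∈ rest, a ≤ x := by
        intro a ha x hx; exact hsep a ha x (by simp [hx])
      obtain ⟨p, m⟩ := ih acc hrest hacc hsep'
      refine ⟨p, fun y => ?_⟩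
      rw [m y]; simp
      constructor
      · tauto
      · rintro (h | rfl | h) <;> tauto

theorem create_list_time_spec : Claim_equal_create_list_time := by
  intro ll _
  unfold Spec_create_list_time create_list_time create_list_time_alt
  simp only []
  set L := ll.foldl (fun acc liste =>
      liste.foldl (fun acc2 time => if time ∈ acc2 then acc2 else acc2 ++ [time]) acc) [] with hLdef
  have hL : L = PySem.Set.ofList ll.flatten := clt_seen_eq_ofList ll
  have hLnodup : L.Nodup := by rw [hL]; exact PySem.Set.nodup_ofList ll.flatten
  have hLmem : ∀ x, x ∈ L ↔ x ∈ ll.flatten := by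
    intro x; rw [hL]; exact PySem.Set.mem_ofList ll.flatten x
  -- the A-side result
  set idx := PySem.List.sorted (PySem.List.pyRange 0 L.length 1)
      (fun k => PySem.List.pyGetD L k 0) false with hidx
  set ares := idx.map (fun i => PySem.List.pyGetD L i 0) with hares
  -- ares is a permutation of L
  have hperm : ares.Perm L := by
    have h1 : idx.Perm (PySem.List.pyRange 0 L.length 1) := PySem.List.sorted_perm _ _ _
    have h2 : ares.Perm ((PySem.List.pyRange 0 L.length 1).map (fun i => PySem.List.pyGetD L i 0)) :=
      h1.map _
    rw [PySem.List.map_pyGetD_pyRange_zero'] at h2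
    exact h2
  -- ares is weakly increasing
  have hle : ares.Pairwise (· ≤ ·) := by
    have := PySem.List.sorted_pairwise (PySem.List.pyRange 0 L.length 1)
      (fun k => PySem.List.pyGetD L k 0)
    rw [← hidx] at this
    rw [hares, List.pairwise_map]
    exact this
  -- hence strictly increasing (it is nodup, being a permutation of L)
  have hanodup : ares.Nodup := hperm.nodup_iff.mpr hLnodup
  have halt : ares.Pairwise (· < ·) :=
    (hle.and hanodup).imp (fun h => lt_of_le_of_ne h.1 h.2)
  -- the B-side result
  set flat := PySem.List.sorted ll.flatten (fun x => x) false with hflat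
  have hflatle : flat.Pairwise (· ≤ ·) := PySem.List.sorted_pairwise ll.flatten (fun x => x)
  obtain ⟨hblt, hbmem⟩ := clt_dedup_invariant flat []
    hflatle (by simp) (by simp)
  set bres := flat.foldl (fun out t =>
      if out = [] ∨ ¬ (PySem.List.pyGetD out (-1) 0 = t) then out ++ [t] else out) [] with hbres
  have hbnodup : bres.Nodup := hblt.imp (fun h => ne_of_lt h)
  -- same elements
  have hsame : ∀ x, x ∈ ares ↔ x ∈ bres := by
    intro x
    rw [hperm.mem_iff, hLmem, hbmem]
    simp [hflat, PySem.List.mem_sorted, List.mem_flatten]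
  -- two strictly increasing lists with the same elements are equal
  have hpermab : ares.Perm bres := (List.perm_ext_iff_of_nodup hanodup hbnodup).mpr hsame
  have h1 : PySem.List.sorted bres (fun x => x) = ares :=
    PySem.List.sorted_eq_of_perm_of_pairwise_lt bres ares (fun x => x) hpermab halt
  have h2 : PySem.List.sorted bres (fun x => x) = bres :=
    PySem.List.sorted_eq_self_of_pairwise bres (fun x => x) (hblt.imp le_of_lt)
  rw [← h1, h2]
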